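-- pv_equiv track=rewrite | github.com/YJHeo01/BOJ | 탑 보기 - 22866번.py | get_left_building_cnt
-- ===== SOURCE A (Python) =====
-- def get_left_building_cnt(array,nearest_building_idx,n):
--     left_building_cnt = [0] * (n+1)
--     stack = []
--     for right_idx in range(1,n+1):
--         while True:
--             if stack == []: break
--             left_idx = stack.pop()
--             if array[left_idx] > array[right_idx]:
--                 nearest_building_idx[right_idx] = left_idx
--                 left_building_cnt[right_idx] = left_building_cnt[left_idx] + 1
--                 stack.append(left_idx)
--                 break
--         stack.append(right_idx)
--     return left_building_cnt
-- ===== SOURCE B (Python) =====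
-- def get_left_building_cnt(array, nearest_building_idx, n):
--     left_building_cnt = [0] * (n + 1)
--     taller = [0] * (n + 1)
--     for i in range(1, n + 1):
--         j = i - 1
--         while j >= 1 and array[j] <= array[i]:
--             j = taller[j]
--         if j >= 1:
--             nearest_building_idx[i] = j
--             taller[i] = j
--             left_building_cnt[i] = left_building_cnt[j] + 1
--     return left_building_cnt
-- ===== Notes on version B (the rewrite author's own statement) =====
-- stated objective: alternative
-- what changed: Replaces the explicit monotonic stack (pop-until-taller, push back) by jump-pointer traversal: a local taller[] array of already-computed nearest-taller links is followed from i-1 until a strictly taller element is found, so no stack is maintained at all.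
import Mathlib
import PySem

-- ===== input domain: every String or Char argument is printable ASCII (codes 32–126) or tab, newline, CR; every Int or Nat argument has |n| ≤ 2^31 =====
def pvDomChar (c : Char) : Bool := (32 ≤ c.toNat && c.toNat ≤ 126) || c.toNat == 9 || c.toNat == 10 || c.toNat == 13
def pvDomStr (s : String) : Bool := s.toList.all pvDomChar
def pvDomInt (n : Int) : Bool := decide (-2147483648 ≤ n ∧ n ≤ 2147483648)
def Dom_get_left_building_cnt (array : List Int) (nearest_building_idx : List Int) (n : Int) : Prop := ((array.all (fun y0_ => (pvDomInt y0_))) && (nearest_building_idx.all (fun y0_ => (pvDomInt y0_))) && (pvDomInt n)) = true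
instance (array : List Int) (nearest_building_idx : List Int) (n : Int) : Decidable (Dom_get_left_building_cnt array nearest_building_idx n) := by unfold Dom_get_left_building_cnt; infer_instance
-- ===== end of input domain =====

-- B replaces A's explicit monotonic stack by jump-pointer traversal over a local array of
-- nearest-taller links (no stack); equivalence is about the RETURN value (both also write
-- nearest_building_idx in place at the same positions with the same values).


-- ===== PORT A =====
-- inner 'while True' loop of A: pop until empty or a strictly taller element is found
def pvPopLoop (array : List Int) (right : Int) (cnt nearest : List Int) :
    List Int → List Int × List Int × List Int
  | [] => (cnt, nearest, [])
  | left :: rest =>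
    if PySem.List.pyGetD array left 0 > PySem.List.pyGetD array right 0 then
      (PySem.List.pySetD cnt right (PySem.List.pyGetD cnt left 0 + 1),
       PySem.List.pySetD nearest right left,
       left :: rest)
    else pvPopLoop array right cnt nearest rest

-- body of A's for-loop; state = (left_building_cnt, nearest_building_idx, stack with top first)
def pvStepA (array : List Int) (st : List Int × List Int × List Int) (right : Int) :
    List Int × List Int × List Int :=
  let r := pvPopLoop array right st.1 st.2.1 st.2.2
  (r.1, r.2.1, right :: r.2.2)

def get_left_building_cnt (array : List Int) (nearest_building_idx : List Int) (n : Int) : List Int :=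
  ((PySem.List.pyRange 1 (n+1) 1).foldl (pvStepA array)
    (List.replicate (n+1).toNat (0:Int), nearest_building_idx, ([] : List Int))).1

-- ===== PORT B =====
-- inner while loop of B: follow taller[] links from j while j >= 1 and array[j] <= array[i]
-- (fuel i.toNat only makes the recursion structural; the condition alone stops it on admitted inputs)
def pvJump (array taller : List Int) (i : Int) : Nat → Int → Int
  | 0, j => j
  | f+1, j =>
    if 1 ≤ j ∧ PySem.List.pyGetD array j 0 ≤ PySem.List.pyGetD array i 0
    then pvJump array taller i f (PySem.List.pyGetD taller j 0) else j

-- body of B's for-loop; state = (left_building_cnt, nearest_building_idx, taller)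
def pvStepB (array : List Int) (st : List Int × List Int × List Int) (i : Int) :
    List Int × List Int × List Int :=
  let j := pvJump array st.2.2 i i.toNat (i - 1)
  if 1 ≤ j then
    (PySem.List.pySetD st.1 i (PySem.List.pyGetD st.1 j 0 + 1),
     PySem.List.pySetD st.2.1 i j,
     PySem.List.pySetD st.2.2 i j)
  else st

def get_left_building_cnt_alt (array : List Int) (nearest_building_idx : List Int) (n : Int) : List Int :=
  ((PySem.List.pyRange 1 (n+1) 1).foldl (pvStepB array)
    (List.replicate (n+1).toNat (0:Int), nearest_building_idx,
     List.replicate (n+1).toNat (0:Int))).1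

-- ===== PRECONDITION & SPEC =====
-- Pre_ holds exactly on the inputs where A returns: for n ≥ 2 the array must be longer than n
-- (A reads array[2..n]) and no write to nearest_building_idx may land at an index ≥ its length,
-- i.e. every i in [max(2, len(nearest_building_idx)), n] has no strictly taller array[j] with 1 ≤ j < i.
def Pre_get_left_building_cnt (array : List Int) (nearest_building_idx : List Int) (n : Int) : Prop :=
  2 ≤ n →
    (n < (array.length : Int) ∧
     ∀ i ∈ PySem.List.pyRange (max 2 (nearest_building_idx.length : Int)) (n+1) 1,
       ∀ j ∈ PySem.List.pyRange 1 i 1,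
         PySem.List.pyGetD array j 0 ≤ PySem.List.pyGetD array i 0)
instance (array : List Int) (nearest_building_idx : List Int) (n : Int) : Decidable (Pre_get_left_building_cnt array nearest_building_idx n) := by unfold Pre_get_left_building_cnt; infer_instance

def pvWitness_get_left_building_cnt : List Int × List Int × Int := ([0, 5, 3, 4], [0, 0, 0, 0], 3)

def Spec_get_left_building_cnt (array : List Int) (nearest_building_idx : List Int) (n : Int) (out : List Int) : Prop := out = get_left_building_cnt_alt array nearest_building_idx n
instance (array : List Int) (nearest_building_idx : List Int) (n : Int) (out : List Int) : Decidable (Spec_get_left_building_cnt array nearest_building_idx n out) := by unfold Spec_get_left_building_cnt; infer_instance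

-- ===== CLAIM (what is proved, stated in full; the proofs are below) =====
def Claim_equal_get_left_building_cnt : Prop := ∀ (array : List Int) (nearest_building_idx : List Int) (n : Int), Dom_get_left_building_cnt array nearest_building_idx n → Pre_get_left_building_cnt array nearest_building_idx n → Spec_get_left_building_cnt array nearest_building_idx n (get_left_building_cnt array nearest_building_idx n)

-- ===== LEMMAS AND PROOFS =====

-- the chain of taller-links starting at j (with fuel); A's stack (top first) is exactly this chain
def pvChain (T : List Int) : Nat → Int → List Int
  | 0, _ => []
  | f+1, j => if 1 ≤ j then j :: pvChain T f (PySem.List.pyGetD T j 0) else []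

-- every taller-link is nonnegative and points strictly below its index
def pvTal (T : List Int) : Prop :=
  ∀ k : Int, 1 ≤ k → 0 ≤ PySem.List.pyGetD T k 0 ∧ PySem.List.pyGetD T k 0 < k

-- invariant relating A's state (cnt, nearest, stack) to B's state (cnt, nearest, taller)
-- after both have processed indices 1..m
def pvInv (n : Int) (m : Nat) (sa sb : List Int × List Int × List Int) : Prop :=
  sa.1 = sb.1 ∧ sa.2.1 = sb.2.1 ∧
  sa.2.2 = pvChain sb.2.2 m (m : Int) ∧
  pvTal sb.2.2 ∧
  (∀ k : Int, (m : Int) < k → PySem.List.pyGetD sb.2.2 k 0 = 0) ∧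
  sb.2.2.length = (n+1).toNat

lemma pvChain_nonpos (T : List Int) (f : Nat) (j : Int) (hj : j ≤ 0) :
    pvChain T f j = [] := by
  cases f with
  | zero => rfl
  | succ f => simp [pvChain]; omega

lemma pvJump_nonpos (array T : List Int) (i : Int) (f : Nat) (j : Int) (hj : j ≤ 0) :
    pvJump array T i f j = j := by
  cases f with
  | zero => rfl
  | succ f => simp [pvJump]; intro h; omega

lemma pvGetD_set (T : List Int) (m j v : Int) (hm : 0 ≤ m) (hj : 0 ≤ j)
    (hlen : m.toNat < T.length) :
    PySem.List.pyGetD (PySem.List.pySetD T m v) j 0 =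
      if j = m then v else PySem.List.pyGetD T j 0 := by
  have h1 : m = ((m.toNat : Nat) : Int) := by omega
  have h2 : j = ((j.toNat : Nat) : Int) := by omega
  rw [h1, h2, PySem.List.pyGetD_pySetD_natCast _ _ _ _ _ hlen]
  by_cases h : j.toNat = m.toNat
  · simp [h]
  · rw [if_neg h, if_neg (by exact_mod_cast h)]

lemma pvGetD_set_ne (T : List Int) (m j v : Int) (hm : 0 ≤ m) (hj : 0 ≤ j) (hne : j ≠ m) :
    PySem.List.pyGetD (PySem.List.pySetD T m v) j 0 = PySem.List.pyGetD T j 0 := by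
  rw [PySem.List.pySetD_of_nonneg T v hm]
  have h2 : j = ((j.toNat : Nat) : Int) := by omega
  rw [h2, PySem.List.pyGetD_natCast, PySem.List.pyGetD_natCast]
  simp [List.getD]
  rw [List.getElem?_set_ne (by omega)]

lemma pvGetD_replicate (N : Nat) (k : Int) (hk : 0 ≤ k) :
    PySem.List.pyGetD (List.replicate N (0:Int)) k 0 = 0 := by
  have h2 : k = ((k.toNat : Nat) : Int) := by omega
  rw [h2, PySem.List.pyGetD_natCast]
  simp [List.getD]

lemma pvChain_fuel (T : List Int) (hT : pvTal T) :
    ∀ (N : Nat) (j : Int), j.toNat ≤ N → ∀ f g, j.toNat ≤ f → j.toNat ≤ g →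
      pvChain T f j = pvChain T g j := by
  intro N
  induction N with
  | zero =>
    intro j hN f g _ _
    rw [pvChain_nonpos T f j (by omega), pvChain_nonpos T g j (by omega)]
  | succ N ih =>
    intro j hN f g hf hg
    by_cases hj : 1 ≤ j
    · obtain ⟨f', rfl⟩ : ∃ f', f = f' + 1 := ⟨f - 1, by omega⟩
      obtain ⟨g', rfl⟩ : ∃ g', g = g' + 1 := ⟨g - 1, by omega⟩
      simp only [pvChain, if_pos hj]
      have h := hT j hj
      rw [ih (PySem.List.pyGetD T j 0) (by omega) f' g' (by omega) (by omega)]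
    · rw [pvChain_nonpos T f j (by omega), pvChain_nonpos T g j (by omega)]

lemma pvJump_le (array T : List Int) (i : Int) (hT : pvTal T) :
    ∀ (f : Nat) (j : Int), pvJump array T i f j ≤ j := by
  intro f
  induction f with
  | zero => intro j; simp [pvJump]
  | succ f ih =>
    intro j
    simp only [pvJump]
    by_cases hc : 1 ≤ j ∧ PySem.List.pyGetD array j 0 ≤ PySem.List.pyGetD array i 0
    · rw [if_pos hc]
      have h := hT j hc.1
      exact le_trans (ih _) (by omega)
    · rw [if_neg hc]

-- A's pop loop over the chain of j computes exactly B's jump endpoint from j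
lemma pvPop_jump (array T : List Int) (i : Int) (hT : pvTal T) :
    ∀ (N : Nat) (j : Int), j.toNat ≤ N → ∀ cnt nearest,
      pvPopLoop array i cnt nearest (pvChain T j.toNat j) =
        (let e := pvJump array T i N j;
         if 1 ≤ e then
           (PySem.List.pySetD cnt i (PySem.List.pyGetD cnt e 0 + 1),
            PySem.List.pySetD nearest i e,
            pvChain T e.toNat e)
         else (cnt, nearest, [])) := by
  intro N
  induction N with
  | zero =>
    intro j hN cnt nearest
    have hj : j ≤ 0 := by omega
    rw [pvChain_nonpos T _ j (by omega)]
    simp only [pvJump_nonpos array T i 0 j hj]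
    rw [if_neg (by omega)]
    rfl
  | succ N ih =>
    intro j hN cnt nearest
    by_cases hj : 1 ≤ j
    · obtain ⟨t, ht⟩ : ∃ t, j.toNat = t + 1 := ⟨j.toNat - 1, by omega⟩
      rw [ht]
      simp only [pvChain, if_pos hj]
      simp only [pvPopLoop, pvJump]
      by_cases hc : PySem.List.pyGetD array j 0 > PySem.List.pyGetD array i 0
      · have hcond : ¬(1 ≤ j ∧ PySem.List.pyGetD array j 0 ≤ PySem.List.pyGetD array i 0) := by
          intro h; omega
        rw [if_pos hc, if_neg hcond, if_pos hj]
        have hexp : pvChain T j.toNat j = j :: pvChain T t (PySem.List.pyGetD T j 0) := by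
          rw [ht]; simp only [pvChain, if_pos hj]
        rw [hexp]
      · rw [if_neg hc]
        have h := hT j hj
        have hch : pvChain T t (PySem.List.pyGetD T j 0) = pvChain T ((PySem.List.pyGetD T j 0).toNat) (PySem.List.pyGetD T j 0) :=
          pvChain_fuel T hT t _ (by omega) t _ (by omega) (by omega)
        rw [hch, ih (PySem.List.pyGetD T j 0) (by omega) cnt nearest]
        have hcond : 1 ≤ j ∧ PySem.List.pyGetD array j 0 ≤ PySem.List.pyGetD array i 0 := ⟨hj, by omega⟩
        rw [if_pos hcond]
    · rw [pvChain_nonpos T _ j (by omega)]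
      rw [pvJump_nonpos array T i (N+1) j (by omega)]
      simp only []
      rw [if_neg (by omega)]
      rfl

-- writing the taller-link of a later index does not change earlier chains
lemma pvChain_set_high (T : List Int) (hT : pvTal T) (m v : Int) (hm : 0 ≤ m) :
    ∀ (f : Nat) (j : Int), j < m →
      pvChain (PySem.List.pySetD T m v) f j = pvChain T f j := by
  intro f
  induction f with
  | zero => intro j _; rfl
  | succ f ih =>
    intro j hjm
    by_cases hj : 1 ≤ j
    · simp only [pvChain, if_pos hj]
      rw [pvGetD_set_ne T m j v hm (by omega) (by omega)]
      have h := hT j hj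
      rw [ih (PySem.List.pyGetD T j 0) (by omega)]
    · rw [pvChain_nonpos _ _ j (by omega), pvChain_nonpos T _ j (by omega)]

lemma pvStep_inv (array : List Int) (n : Int) (m : Nat) (sa sb : List Int × List Int × List Int)
    (hinv : pvInv n m sa sb) (hmn : (m : Int) + 1 ≤ n) :
    pvInv n (m+1) (pvStepA array sa ((m : Int)+1)) (pvStepB array sb ((m : Int)+1)) := by
  obtain ⟨h1, h2, h3, hT, hZ, hL⟩ := hinv
  set T := sb.2.2 with hTdef
  have hMnn : (0:Int) ≤ (m : Int) + 1 := by omega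
  have hMtoNat : ((m : Int) + 1).toNat = m + 1 := by omega
  have hmtoNat : ((m : Int)).toNat = m := by omega
  have hlen : ((m : Int) + 1).toNat < T.length := by
    rw [hL]; omega
  -- B's jump start is (m+1) - 1 = m
  have hstart : ((m : Int) + 1) - 1 = (m : Int) := by ring
  set e := pvJump array T ((m : Int)+1) (m+1) ((m : Int)) with he
  have hele : e ≤ (m : Int) := pvJump_le array T _ hT _ _
  -- A's pop loop on the chain
  have hpop := pvPop_jump array T ((m : Int)+1) hT (m+1) ((m : Int)) (by omega) sa.1 sa.2.1
  rw [hmtoNat] at hpop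
  have hstepA : pvStepA array sa ((m : Int)+1) =
      (let r := (if 1 ≤ e then
           (PySem.List.pySetD sa.1 ((m : Int)+1) (PySem.List.pyGetD sa.1 e 0 + 1),
            PySem.List.pySetD sa.2.1 ((m : Int)+1) e,
            pvChain T e.toNat e)
         else (sa.1, sa.2.1, []));
       (r.1, r.2.1, ((m : Int)+1) :: r.2.2)) := by
    show (let r := pvPopLoop array ((m : Int)+1) sa.1 sa.2.1 sa.2.2;
          (r.1, r.2.1, ((m : Int)+1) :: r.2.2)) = _
    rw [h3, hpop]
  have hstepB : pvStepB array sb ((m : Int)+1) =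
      (if 1 ≤ e then
        (PySem.List.pySetD sb.1 ((m : Int)+1) (PySem.List.pyGetD sb.1 e 0 + 1),
         PySem.List.pySetD sb.2.1 ((m : Int)+1) e,
         PySem.List.pySetD T ((m : Int)+1) e)
       else sb) := by
    unfold pvStepB
    rw [hstart, hMtoNat]
  by_cases hcase : 1 ≤ e
  · rw [hstepA, hstepB]
    simp only [if_pos hcase]
    refine ⟨by simp [h1], by simp [h2], ?_, ?_, ?_, ?_⟩
    · -- stack = chain of new taller array
      show ((m : Int)+1) :: pvChain T e.toNat e =
        pvChain (PySem.List.pySetD T ((m : Int)+1) e) (m+1) ((m+1 : Nat) : Int)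
      have hcast : ((m+1 : Nat) : Int) = (m : Int) + 1 := by push_cast; ring
      rw [hcast]
      simp only [pvChain, if_pos (by omega : (1:Int) ≤ (m : Int)+1)]
      rw [pvGetD_set (hm := hMnn) (hj := hMnn) (hlen := hlen), if_pos rfl]
      rw [pvChain_set_high T hT _ e hMnn m e (by omega)]
      rw [pvChain_fuel T hT m e (by omega) m e.toNat (by omega) (by omega)]
    · -- pvTal preserved
      intro k hk
      by_cases hke : k = (m : Int) + 1
      · rw [hke, pvGetD_set (hm := hMnn) (hj := hMnn) (hlen := hlen), if_pos rfl]
        constructor <;> omega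
      · rw [pvGetD_set_ne T _ k e hMnn (by omega) hke]
        exact hT k hk
    · -- zeros above m+1 preserved
      intro k hk
      have hcast : ((m+1 : Nat) : Int) = (m : Int) + 1 := by push_cast; ring
      rw [hcast] at hk
      rw [pvGetD_set_ne T _ k e hMnn (by omega) (by omega)]
      exact hZ k (by omega)
    · -- length preserved
      show (PySem.List.pySetD T ((m : Int)+1) e).length = _
      rw [PySem.List.length_pySetD, hL]
  · rw [hstepA, hstepB]
    simp only [if_neg hcase]
    refine ⟨h1, h2, ?_, hT, ?_, hL⟩
    · -- stack = [m+1] = chain of unchanged taller array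
      show ((m : Int)+1) :: ([] : List Int) = pvChain T (m+1) ((m+1 : Nat) : Int)
      have hcast : ((m+1 : Nat) : Int) = (m : Int) + 1 := by push_cast; ring
      rw [hcast]
      simp only [pvChain, if_pos (by omega : (1:Int) ≤ (m : Int)+1)]
      rw [hZ ((m : Int)+1) (by omega), pvChain_nonpos T m 0 (by omega)]
    · intro k hk
      have hcast : ((m+1 : Nat) : Int) = (m : Int) + 1 := by push_cast; ring
      rw [hcast] at hk
      exact hZ k (by omega)

lemma pvMain (array nbi : List Int) (n : Int) :
    ∀ (m : Nat), (m : Int) ≤ n →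
      pvInv n m
        ((PySem.List.pyRange 1 ((m : Int)+1) 1).foldl (pvStepA array)
          (List.replicate (n+1).toNat (0:Int), nbi, ([] : List Int)))
        ((PySem.List.pyRange 1 ((m : Int)+1) 1).foldl (pvStepB array)
          (List.replicate (n+1).toNat (0:Int), nbi, List.replicate (n+1).toNat (0:Int))) := by
  intro m
  induction m with
  | zero =>
    intro _
    rw [PySem.List.pyRange_one_eq_nil (by omega)]
    simp only [List.foldl_nil]
    refine ⟨rfl, rfl, rfl, ?_, ?_, by simp⟩
    · intro k hk
      rw [pvGetD_replicate _ k (by omega)]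
      constructor <;> omega
    · intro k hk
      exact pvGetD_replicate _ k (by omega)
  | succ m ih =>
    intro hmn
    have hcast : ((m+1 : Nat) : Int) = (m : Int) + 1 := by push_cast; ring
    rw [hcast]
    have hsplit : PySem.List.pyRange 1 (((m : Int)+1)+1) 1 =
        PySem.List.pyRange 1 ((m : Int)+1) 1 ++ [(m : Int)+1] :=
      PySem.List.pyRange_one_succ_right (by omega)
    rw [hsplit, List.foldl_append, List.foldl_append]
    simp only [List.foldl_cons, List.foldl_nil]
    have hmn' : (m : Int) ≤ n := by omega
    exact pvStep_inv array n m _ _ (ih hmn') (by omega)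

-- ===== VERDICT (by name: the statement is the Claim_ definition above) =====
theorem get_left_building_cnt_spec : Claim_equal_get_left_building_cnt := by
  intro array nbi n _ _
  unfold Spec_get_left_building_cnt get_left_building_cnt get_left_building_cnt_alt
  by_cases hn : 0 ≤ n
  · have h := pvMain array nbi n n.toNat (by omega)
    have hcast : ((n.toNat : Nat) : Int) = n := by omega
    rw [hcast] at h
    exact h.1
  · rw [PySem.List.pyRange_one_eq_nil (by omega)]
    simp
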